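-- pv_equiv track=rewrite | github.com/catherinevee/catnet | fix_all_remaining_issues.py | remove_duplicate_docstrings
-- ===== SOURCE A (Python) =====
-- def remove_duplicate_docstrings(content):
--     """Remove duplicate docstrings in class definitions."""
--     lines = content.split("\n")
--     fixed_lines = []
--     i = 0
--
--     while i < len(lines):
--         line = lines[i]
--         fixed_lines.append(line)
--
--         # Check if this is a class definition
--         if "class " in line and (
--             "BaseModel" in line or "@dataclass" in lines[max(0, i - 1)]
--         ):
--             i += 1
--             # Look for docstring
--             if i < len(lines) and '"""' in lines[i]:
--                 docstring_line = lines[i]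
--                 fixed_lines.append(docstring_line)
--                 i += 1
--
--                 # Skip empty line
--                 if i < len(lines) and lines[i].strip() == "":
--                     fixed_lines.append(lines[i])
--                     i += 1
--
--                 # Check for duplicate docstring
--                 if (
--                     i < len(lines)
--                     and '"""' in lines[i]
--                     and lines[i].strip() == docstring_line.strip()
--                 ):
--                     # Skip duplicate
--                     i += 1
--                     # Also skip empty line after duplicate if present
--                     if i < len(lines) and lines[i].strip() == "":
--                         i += 1
--         else:
--             i += 1
--
--     return "\n".join(fixed_lines)
-- ===== SOURCE B (Python) =====
-- def remove_duplicate_docstrings(content):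
--     """Single forward pass driven by a 5-state machine (no index arithmetic or
--     lookahead): each line is emitted or dropped based only on the current state,
--     the line itself, and the previous original line."""
--     lines = content.split("\n")
--     out = []
--     mode = "text"        # text | doc | dup1 | dup2 | skipblank
--     ds = None            # docstring line of the class block being tracked
--     prev = lines[0]      # Python's lines[max(0, i-1)] makes line 0 its own predecessor
--     for line in lines:
--         if mode == "skipblank":
--             mode = "text"
--             if line.strip() == "":
--                 prev = line
--                 continue
--         if mode == "doc":
--             mode = "text"
--             if '"""' in line:
--                 out.append(line)
--                 ds = line
--                 mode = "dup1"
--                 prev = line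
--                 continue
--         elif mode == "dup1":
--             mode = "text"
--             if line.strip() == "":
--                 out.append(line)
--                 mode = "dup2"
--                 prev = line
--                 continue
--             if '"""' in line and line.strip() == ds.strip():
--                 mode = "skipblank"
--                 prev = line
--                 continue
--         elif mode == "dup2":
--             mode = "text"
--             if '"""' in line and line.strip() == ds.strip():
--                 mode = "skipblank"
--                 prev = line
--                 continue
--         # ordinary handling: keep the line, arm the machine on a class trigger
--         out.append(line)
--         if "class " in line and ("BaseModel" in line or "@dataclass" in prev):
--             mode = "doc"
--         prev = line
--     return "\n".join(out)
-- ===== Notes on version B (the rewrite author's own statement) =====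
-- stated objective: alternative
-- what changed: B replaces A's index-manipulating scan with lookahead (lines[i+1], lines[j], max(0,i-1)) by a single forward pass driven by an explicit 5-state machine that inspects one line at a time and carries the tracked docstring and previous line in its state.
import Mathlib
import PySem

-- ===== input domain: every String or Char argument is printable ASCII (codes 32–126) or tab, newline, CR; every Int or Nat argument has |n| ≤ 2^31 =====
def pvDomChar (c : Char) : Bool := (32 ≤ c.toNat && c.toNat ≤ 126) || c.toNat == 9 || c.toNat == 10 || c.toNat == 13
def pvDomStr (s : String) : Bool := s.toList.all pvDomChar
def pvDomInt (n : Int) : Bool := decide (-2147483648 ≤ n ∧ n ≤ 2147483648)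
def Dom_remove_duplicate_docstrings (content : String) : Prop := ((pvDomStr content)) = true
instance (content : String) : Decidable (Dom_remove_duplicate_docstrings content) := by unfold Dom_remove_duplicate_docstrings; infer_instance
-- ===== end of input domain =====

-- B replaces A's index/lookahead scan by a single forward pass driven by a
-- 5-state machine that looks at one line at a time (objective: alternative).

-- ===== PORT A =====
-- A's while-loop; fuel bounds the number of iterations (i strictly increases each
-- iteration, so fuel = lines.length from the top-level call never runs out).
-- The successive `i += 1` steps of A appear as successor-shaped indices i+1, i+1+1, ...
def pvLoopA (lines : List String) : Nat → Nat → List String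
  | 0, _ => []
  | fuel + 1, i =>
    if i < lines.length then
      let line := lines.getD i ""
      if PySem.Str.isIn "class " line &&
          (PySem.Str.isIn "BaseModel" line ||
           PySem.Str.isIn "@dataclass" (lines.getD (i - 1) "")) then
        -- i += 1; look for docstring
        if i + 1 < lines.length && PySem.Str.isIn "\"\"\"" (lines.getD (i + 1) "") then
          let ds := lines.getD (i + 1) ""
          -- i += 1; skip empty line
          let blankPart :=
            if i + 1 + 1 < lines.length && (PySem.Str.strip (lines.getD (i + 1 + 1) "") == "") then
              [lines.getD (i + 1 + 1) ""]
            else []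
          let j :=
            if i + 1 + 1 < lines.length && (PySem.Str.strip (lines.getD (i + 1 + 1) "") == "") then
              i + 1 + 1 + 1
            else i + 1 + 1
          -- check for duplicate docstring; then also skip the blank after it if present
          let j' :=
            if j < lines.length &&
                (PySem.Str.isIn "\"\"\"" (lines.getD j "") &&
                 (PySem.Str.strip (lines.getD j "") == PySem.Str.strip ds)) then
              if j + 1 < lines.length && (PySem.Str.strip (lines.getD (j + 1) "") == "") then
                j + 1 + 1
              else j + 1
            else j
          line :: ds :: blankPart ++ pvLoopA lines fuel j'
        else line :: pvLoopA lines fuel (i + 1)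
      else line :: pvLoopA lines fuel (i + 1)
    else []

def remove_duplicate_docstrings (content : String) : String :=
  let lines := ((PySem.Str.split? content "\n").getD [])
  PySem.Str.join "\n" (pvLoopA lines lines.length 0)

-- ===== PORT B =====
-- the class-definition trigger test of Source B's ordinary handling
def pvTrig (line prev : String) : Bool :=
  PySem.Str.isIn "class " line &&
    (PySem.Str.isIn "BaseModel" line || PySem.Str.isIn "@dataclass" prev)

-- the state of Source B's machine
inductive PvMode
  | text | doc | dup1 | dup2 | skipblank
deriving DecidableEq, Repr

-- Source B's for-loop: one line at a time; state = (mode, tracked docstring, previous line)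
def pvStepB : List String → PvMode → String → String → List String
  | [], _, _, _ => []
  | line :: rest, mode, ds, prev =>
    -- ordinary handling: keep the line, arm the machine on a class trigger
    let nrm := line :: pvStepB rest (if pvTrig line prev then PvMode.doc else PvMode.text) ds line
    if mode = PvMode.skipblank then
      if PySem.Str.strip line == "" then pvStepB rest PvMode.text ds line else nrm
    else if mode = PvMode.doc then
      if PySem.Str.isIn "\"\"\"" line then line :: pvStepB rest PvMode.dup1 line line else nrm
    else if mode = PvMode.dup1 then
      if PySem.Str.strip line == "" then line :: pvStepB rest PvMode.dup2 ds line
      else if PySem.Str.isIn "\"\"\"" line && (PySem.Str.strip line == PySem.Str.strip ds) then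
        pvStepB rest PvMode.skipblank ds line
      else nrm
    else if mode = PvMode.dup2 then
      if PySem.Str.isIn "\"\"\"" line && (PySem.Str.strip line == PySem.Str.strip ds) then
        pvStepB rest PvMode.skipblank ds line
      else nrm
    else nrm

def remove_duplicate_docstrings_alt (content : String) : String :=
  let lines := ((PySem.Str.split? content "\n").getD [])
  PySem.Str.join "\n" (pvStepB lines PvMode.text "" (lines.headD ""))

-- ===== PRECONDITION & SPEC =====
def Spec_remove_duplicate_docstrings (content : String) (out : String) : Prop := out = remove_duplicate_docstrings_alt content
instance (content : String) (out : String) : Decidable (Spec_remove_duplicate_docstrings content out) := by unfold Spec_remove_duplicate_docstrings; infer_instance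

-- ===== CLAIM (what is proved, stated in full; the proofs are below) =====
def Claim_equal_remove_duplicate_docstrings : Prop := ∀ (content : String), Dom_remove_duplicate_docstrings content → Spec_remove_duplicate_docstrings content (remove_duplicate_docstrings content)

-- ===== LEMMAS AND PROOFS =====

theorem pvLoopA_nil (lines : List String) (fuel j : Nat) (h : lines.length ≤ j) :
    pvLoopA lines fuel j = [] := by
  cases fuel <;> simp [pvLoopA, Nat.not_lt.mpr h]

theorem pvDropCons (lines : List String) (i : Nat) (h : i < lines.length) :
    lines.drop i = lines.getD i "" :: lines.drop (i + 1) := by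
  rw [List.drop_eq_getElem_cons h, List.getD_eq_getElem lines "" h]

theorem pvStepB_nil (mode : PvMode) (ds prev : String) :
    pvStepB [] mode ds prev = [] := by
  simp [pvStepB]

theorem pvNeTrue {b : Bool} (h : b = false) : ¬ (b = true) := by
  rw [h]; exact Bool.false_ne_true

-- the invariant: Source B's machine restarted in "text" state at position i, with the
-- true previous line, produces exactly what A's loop produces from position i
theorem pvMain (lines : List String) :
    ∀ (fuel i : Nat) (ds : String), lines.length - i ≤ fuel →
      pvStepB (lines.drop i) PvMode.text ds (lines.getD (i - 1) "") =
        pvLoopA lines fuel i := by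
  intro fuel
  induction fuel with
  | zero =>
    intro i ds h
    have hlen : lines.length ≤ i := by omega
    simp [pvLoopA, List.drop_eq_nil_of_le hlen, pvStepB_nil]
  | succ f ih =>
    intro i ds h
    by_cases hi : i < lines.length
    case neg =>
      have hlen : lines.length ≤ i := by omega
      simp [pvLoopA, hi, List.drop_eq_nil_of_le hlen, pvStepB_nil]
    case pos =>
      rw [pvDropCons lines i hi]
      simp only [pvLoopA, if_pos hi]
      simp only [pvStepB, reduceCtorEq, reduceIte]
      by_cases ht : pvTrig (lines.getD i "") (lines.getD (i - 1) "") = true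
      case neg =>
        -- no class trigger: both keep the line and move on
        rw [if_neg ht]
        have hIH := ih (i + 1) ds (by omega)
        simp only [Nat.add_sub_cancel] at hIH
        rw [hIH]
        simp only [pvTrig] at ht
        rw [if_neg ht]
      case pos =>
        rw [if_pos ht]
        simp only [pvTrig] at ht
        rw [if_pos ht]
        by_cases h1 : i + 1 < lines.length
        case neg =>
          have hC1 : (decide (i + 1 < lines.length) &&
              PySem.Str.isIn "\"\"\"" (lines.getD (i + 1) "")) = false := by
            rw [decide_eq_false h1, Bool.false_and]
          rw [List.drop_eq_nil_of_le (by omega : lines.length ≤ i + 1), pvStepB_nil,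
            pvLoopA_nil lines f (i + 1) (by omega)]
          simp only [if_neg (pvNeTrue hC1)]
        case pos =>
          rw [pvDropCons lines (i + 1) h1]
          by_cases h2 : PySem.Str.isIn "\"\"\"" (lines.getD (i + 1) "") = true
          case neg =>
            -- class line but no docstring: the next line gets ordinary handling
            rw [Bool.not_eq_true] at h2
            have hC1 : (decide (i + 1 < lines.length) &&
                PySem.Str.isIn "\"\"\"" (lines.getD (i + 1) "")) = false := by
              rw [h2, Bool.and_false]
            simp only [if_neg (pvNeTrue hC1)]
            have hIH := ih (i + 1) ds (by omega)
            simp only [Nat.add_sub_cancel] at hIH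
            rw [pvDropCons lines (i + 1) h1] at hIH
            simp only [pvStepB, reduceCtorEq, reduceIte] at hIH ⊢
            rw [if_neg (pvNeTrue h2)]
            rw [hIH]
          case pos =>
            have hC1 : (decide (i + 1 < lines.length) &&
                PySem.Str.isIn "\"\"\"" (lines.getD (i + 1) "")) = true := by
              rw [decide_eq_true h1, Bool.true_and]; exact h2
            simp only [if_pos hC1]
            simp only [pvStepB, reduceCtorEq, reduceIte]
            rw [if_pos h2]
            by_cases h3 : i + 1 + 1 < lines.length
            case neg =>
              have hC2 : (decide (i + 1 + 1 < lines.length) &&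
                  (PySem.Str.strip (lines.getD (i + 1 + 1) "") == "")) = false := by
                rw [decide_eq_false h3, Bool.false_and]
              have hC3 : (decide (i + 1 + 1 < lines.length) &&
                  (PySem.Str.isIn "\"\"\"" (lines.getD (i + 1 + 1) "") &&
                   (PySem.Str.strip (lines.getD (i + 1 + 1) "") ==
                    PySem.Str.strip (lines.getD (i + 1) "")))) = false := by
                rw [decide_eq_false h3, Bool.false_and]
              rw [List.drop_eq_nil_of_le (by omega : lines.length ≤ i + 1 + 1), pvStepB_nil]
              simp only [if_neg (pvNeTrue hC2), if_neg (pvNeTrue hC3)]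
              rw [pvLoopA_nil lines f (i + 1 + 1) (by omega)]
              rfl
            case pos =>
              rw [pvDropCons lines (i + 1 + 1) h3]
              by_cases hb : (PySem.Str.strip (lines.getD (i + 1 + 1) "") == "") = true
              case pos =>
                -- blank after the docstring is kept; duplicate sought at i+1+1+1
                have hC2 : (decide (i + 1 + 1 < lines.length) &&
                    (PySem.Str.strip (lines.getD (i + 1 + 1) "") == "")) = true := by
                  rw [decide_eq_true h3, Bool.true_and]; exact hb
                simp only [if_pos hC2]
                simp only [pvStepB, reduceCtorEq, reduceIte]
                rw [if_pos hb]
                by_cases h4 : i + 1 + 1 + 1 < lines.length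
                case neg =>
                  have hC3 : (decide (i + 1 + 1 + 1 < lines.length) &&
                      (PySem.Str.isIn "\"\"\"" (lines.getD (i + 1 + 1 + 1) "") &&
                       (PySem.Str.strip (lines.getD (i + 1 + 1 + 1) "") ==
                        PySem.Str.strip (lines.getD (i + 1) "")))) = false := by
                    rw [decide_eq_false h4, Bool.false_and]
                  rw [List.drop_eq_nil_of_le (by omega : lines.length ≤ i + 1 + 1 + 1), pvStepB_nil]
                  simp only [if_neg (pvNeTrue hC3)]
                  rw [pvLoopA_nil lines f (i + 1 + 1 + 1) (by omega)]
                  rfl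
                case pos =>
                  rw [pvDropCons lines (i + 1 + 1 + 1) h4]
                  by_cases hd : (PySem.Str.isIn "\"\"\"" (lines.getD (i + 1 + 1 + 1) "") &&
                      (PySem.Str.strip (lines.getD (i + 1 + 1 + 1) "") ==
                       PySem.Str.strip (lines.getD (i + 1) ""))) = true
                  case neg =>
                    -- no duplicate: the line after the blank gets ordinary handling
                    rw [Bool.not_eq_true] at hd
                    have hC3 : (decide (i + 1 + 1 + 1 < lines.length) &&
                        (PySem.Str.isIn "\"\"\"" (lines.getD (i + 1 + 1 + 1) "") &&
                         (PySem.Str.strip (lines.getD (i + 1 + 1 + 1) "") ==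
                          PySem.Str.strip (lines.getD (i + 1) "")))) = false := by
                      rw [hd, Bool.and_false]
                    simp only [if_neg (pvNeTrue hC3)]
                    have hIH := ih (i + 1 + 1 + 1) (lines.getD (i + 1) "") (by omega)
                    rw [(by omega : i + 1 + 1 + 1 - 1 = i + 1 + 1)] at hIH
                    rw [pvDropCons lines (i + 1 + 1 + 1) h4] at hIH
                    simp only [pvStepB, reduceCtorEq, reduceIte] at hIH ⊢
                    -- dup2's duplicate test fails; dup1's blank test would not fire in hIH
                    rw [if_neg (pvNeTrue hd)]
                    rw [hIH]
                    rfl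
                  case pos =>
                    -- duplicate dropped; maybe also its trailing blank
                    have hC3 : (decide (i + 1 + 1 + 1 < lines.length) &&
                        (PySem.Str.isIn "\"\"\"" (lines.getD (i + 1 + 1 + 1) "") &&
                         (PySem.Str.strip (lines.getD (i + 1 + 1 + 1) "") ==
                          PySem.Str.strip (lines.getD (i + 1) "")))) = true := by
                      rw [decide_eq_true h4, Bool.true_and]; exact hd
                    simp only [if_pos hC3]
                    simp only [pvStepB, reduceCtorEq, reduceIte]
                    rw [if_pos hd]
                    by_cases h5 : i + 1 + 1 + 1 + 1 < lines.length
                    case neg =>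
                      have hC4 : (decide (i + 1 + 1 + 1 + 1 < lines.length) &&
                          (PySem.Str.strip (lines.getD (i + 1 + 1 + 1 + 1) "") == "")) = false := by
                        rw [decide_eq_false h5, Bool.false_and]
                      rw [List.drop_eq_nil_of_le (by omega : lines.length ≤ i + 1 + 1 + 1 + 1),
                        pvStepB_nil]
                      simp only [if_neg (pvNeTrue hC4)]
                      rw [pvLoopA_nil lines f (i + 1 + 1 + 1 + 1) (by omega)]
                      rfl
                    case pos =>
                      rw [pvDropCons lines (i + 1 + 1 + 1 + 1) h5]
                      by_cases hb4 : (PySem.Str.strip (lines.getD (i + 1 + 1 + 1 + 1) "") == "") = true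
                      case pos =>
                        have hC4 : (decide (i + 1 + 1 + 1 + 1 < lines.length) &&
                            (PySem.Str.strip (lines.getD (i + 1 + 1 + 1 + 1) "") == "")) = true := by
                          rw [decide_eq_true h5, Bool.true_and]; exact hb4
                        simp only [if_pos hC4]
                        simp only [pvStepB, reduceCtorEq, reduceIte]
                        rw [if_pos hb4]
                        have hIH := ih (i + 1 + 1 + 1 + 1 + 1) (lines.getD (i + 1) "") (by omega)
                        rw [(by omega : i + 1 + 1 + 1 + 1 + 1 - 1 = i + 1 + 1 + 1 + 1)] at hIH
                        rw [hIH]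
                        rfl
                      case neg =>
                        rw [Bool.not_eq_true] at hb4
                        have hC4 : (decide (i + 1 + 1 + 1 + 1 < lines.length) &&
                            (PySem.Str.strip (lines.getD (i + 1 + 1 + 1 + 1) "") == "")) = false := by
                          rw [hb4, Bool.and_false]
                        simp only [if_neg (pvNeTrue hC4)]
                        have hIH := ih (i + 1 + 1 + 1 + 1) (lines.getD (i + 1) "") (by omega)
                        rw [(by omega : i + 1 + 1 + 1 + 1 - 1 = i + 1 + 1 + 1)] at hIH
                        rw [pvDropCons lines (i + 1 + 1 + 1 + 1) h5] at hIH
                        simp only [pvStepB, reduceCtorEq, reduceIte] at hIH ⊢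
                        rw [if_neg (pvNeTrue hb4)]
                        rw [hIH]
                        rfl
              case neg =>
                -- no blank: the duplicate is sought right at i+1+1
                rw [Bool.not_eq_true] at hb
                have hC2 : (decide (i + 1 + 1 < lines.length) &&
                    (PySem.Str.strip (lines.getD (i + 1 + 1) "") == "")) = false := by
                  rw [hb, Bool.and_false]
                simp only [if_neg (pvNeTrue hC2)]
                simp only [pvStepB, reduceCtorEq, reduceIte]
                rw [if_neg (pvNeTrue hb)]
                by_cases hd : (PySem.Str.isIn "\"\"\"" (lines.getD (i + 1 + 1) "") &&
                    (PySem.Str.strip (lines.getD (i + 1 + 1) "") ==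
                     PySem.Str.strip (lines.getD (i + 1) ""))) = true
                case neg =>
                  rw [Bool.not_eq_true] at hd
                  have hC3 : (decide (i + 1 + 1 < lines.length) &&
                      (PySem.Str.isIn "\"\"\"" (lines.getD (i + 1 + 1) "") &&
                       (PySem.Str.strip (lines.getD (i + 1 + 1) "") ==
                        PySem.Str.strip (lines.getD (i + 1) "")))) = false := by
                    rw [hd, Bool.and_false]
                  simp only [if_neg (pvNeTrue hC3)]
                  rw [if_neg (pvNeTrue hd)]
                  have hIH := ih (i + 1 + 1) (lines.getD (i + 1) "") (by omega)
                  rw [(by omega : i + 1 + 1 - 1 = i + 1)] at hIH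
                  rw [pvDropCons lines (i + 1 + 1) h3] at hIH
                  simp only [pvStepB, reduceCtorEq, reduceIte] at hIH
                  rw [hIH]
                  rfl
                case pos =>
                  have hC3 : (decide (i + 1 + 1 < lines.length) &&
                      (PySem.Str.isIn "\"\"\"" (lines.getD (i + 1 + 1) "") &&
                       (PySem.Str.strip (lines.getD (i + 1 + 1) "") ==
                        PySem.Str.strip (lines.getD (i + 1) "")))) = true := by
                    rw [decide_eq_true h3, Bool.true_and]; exact hd
                  simp only [if_pos hC3]
                  rw [if_pos hd]
                  by_cases h4 : i + 1 + 1 + 1 < lines.length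
                  case neg =>
                    have hC4 : (decide (i + 1 + 1 + 1 < lines.length) &&
                        (PySem.Str.strip (lines.getD (i + 1 + 1 + 1) "") == "")) = false := by
                      rw [decide_eq_false h4, Bool.false_and]
                    rw [List.drop_eq_nil_of_le (by omega : lines.length ≤ i + 1 + 1 + 1), pvStepB_nil]
                    simp only [if_neg (pvNeTrue hC4)]
                    rw [pvLoopA_nil lines f (i + 1 + 1 + 1) (by omega)]
                    rfl
                  case pos =>
                    rw [pvDropCons lines (i + 1 + 1 + 1) h4]
                    by_cases hb3 : (PySem.Str.strip (lines.getD (i + 1 + 1 + 1) "") == "") = true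
                    case pos =>
                      have hC4 : (decide (i + 1 + 1 + 1 < lines.length) &&
                          (PySem.Str.strip (lines.getD (i + 1 + 1 + 1) "") == "")) = true := by
                        rw [decide_eq_true h4, Bool.true_and]; exact hb3
                      simp only [if_pos hC4]
                      simp only [pvStepB, reduceCtorEq, reduceIte]
                      rw [if_pos hb3]
                      have hIH := ih (i + 1 + 1 + 1 + 1) (lines.getD (i + 1) "") (by omega)
                      rw [(by omega : i + 1 + 1 + 1 + 1 - 1 = i + 1 + 1 + 1)] at hIH
                      rw [hIH]
                      rfl
                    case neg =>
                      rw [Bool.not_eq_true] at hb3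
                      have hC4 : (decide (i + 1 + 1 + 1 < lines.length) &&
                          (PySem.Str.strip (lines.getD (i + 1 + 1 + 1) "") == "")) = false := by
                        rw [hb3, Bool.and_false]
                      simp only [if_neg (pvNeTrue hC4)]
                      have hIH := ih (i + 1 + 1 + 1) (lines.getD (i + 1) "") (by omega)
                      rw [(by omega : i + 1 + 1 + 1 - 1 = i + 1 + 1)] at hIH
                      rw [pvDropCons lines (i + 1 + 1 + 1) h4] at hIH
                      simp only [pvStepB, reduceCtorEq, reduceIte] at hIH ⊢
                      rw [if_neg (pvNeTrue hb3)]
                      rw [hIH]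
                      rfl

-- the two top-level wrappers agree on any line list
theorem pvTop (L : List String) :
    PySem.Str.join "\n" (pvLoopA L L.length 0) =
      PySem.Str.join "\n" (pvStepB L PvMode.text "" (L.headD "")) := by
  have h := pvMain L L.length 0 "" (by omega)
  rw [List.drop_zero, (by omega : (0 : Nat) - 1 = 0)] at h
  have hh : L.headD "" = L.getD 0 "" := by cases L <;> rfl
  rw [hh, h]

-- ===== VERDICT (by name: the statement is the Claim_ definition above) =====
theorem remove_duplicate_docstrings_spec : Claim_equal_remove_duplicate_docstrings :=
  fun content _ => pvTop ((PySem.Str.split? content "\n").getD [])
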